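-- pv_equiv track=rewrite | github.com/Neterlon/python-gui-encryptor | encryption_utils.py | increasing_numbers_order
-- ===== SOURCE A (Python) =====
-- def increasing_numbers_order(lst):
--     temp_list = lst.copy()
--     converted_list = [None for i in range(len(lst))]
--     for i in range(len(lst)):
--         min_number = min(temp_list)
--         min_number_index = lst.index(min_number)
--         converted_list[min_number_index] = i
--         temp_list.remove(min_number)
--     return converted_list
-- ===== SOURCE B (Python) =====
-- def increasing_numbers_order(lst):
--     order = sorted(range(len(lst)), key=lambda i: lst[i])
--     converted_list = [None] * len(lst)
--     for rank, idx in enumerate(order):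
--         converted_list[idx] = rank
--     return converted_list
-- ===== Notes on version B (the rewrite author's own statement) =====
-- stated objective: alternative
-- what changed: Replaces the repeated min/index/remove selection loop (each pass scanning the list) by a single stable sort of the index list by value, then one pass assigning ranks.
-- outside the precondition, e.g. on increasing_numbers_order([1, 1]): A returns [1, None], B returns [0, 1]; on increasing_numbers_order([2, 1, 2, 1]): A returns [3, 1, None, None], B returns [2, 0, 3, 1]
import Mathlib
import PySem

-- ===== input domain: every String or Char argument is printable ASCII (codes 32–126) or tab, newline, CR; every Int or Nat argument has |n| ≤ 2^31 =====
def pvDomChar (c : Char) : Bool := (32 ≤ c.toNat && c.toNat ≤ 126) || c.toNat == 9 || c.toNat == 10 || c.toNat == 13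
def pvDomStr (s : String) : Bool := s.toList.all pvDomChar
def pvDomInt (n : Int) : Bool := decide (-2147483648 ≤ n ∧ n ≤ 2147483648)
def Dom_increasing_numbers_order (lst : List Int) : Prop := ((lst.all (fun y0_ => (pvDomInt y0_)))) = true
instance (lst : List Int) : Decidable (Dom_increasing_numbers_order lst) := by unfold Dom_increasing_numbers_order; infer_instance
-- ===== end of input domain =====

-- B replaces A's repeated min/index/remove selection loop by one stable sort of the index list
-- by value followed by a single rank-assignment pass (objective: alternative algorithm).

-- ===== PORT A =====
-- loop body of A's for-loop, kept as a named helper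
def pvStepA (lst : List Int) (st : List Int × List (Option Int)) (i : Int) :
    List Int × List (Option Int) :=
  match PySem.List.min? st.1 (fun x => x) with
  | none => st        -- unreachable: temp_list is nonempty at every iteration
  | some m =>
    match PySem.List.index? lst m with
    | none => st      -- unreachable: m ∈ lst
    | some j =>
      match PySem.List.remove? st.1 m with
      | none => (st.1, st.2.set j (some i))   -- unreachable: m ∈ temp_list
      | some t => (t, st.2.set j (some i))

def increasing_numbers_order (lst : List Int) : List Int :=
  let temp0 := lst
  let conv0 : List (Option Int) := (PySem.List.pyRange 0 lst.length 1).map (fun _ => none)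
  let res := (PySem.List.pyRange 0 lst.length 1).foldl (pvStepA lst) (temp0, conv0)
  -- Python's value keeps None cells exactly on duplicate inputs (excluded by Pre_);
  -- on Pre_ every cell is some, so the getD default is never used
  res.2.map (fun o => o.getD 0)

-- ===== PORT B =====
-- loop body of B's for-loop over enumerate(order)
def pvStepB (c : List (Option Int)) (p : Int × Nat) : List (Option Int) :=
  c.set p.2 (some p.1)

def increasing_numbers_order_alt (lst : List Int) : List Int :=
  let order := PySem.List.sorted (List.range lst.length) (fun i => lst.getD i 0)
  let conv := (PySem.List.enumerate order 0).foldl pvStepB (List.replicate lst.length none)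
  conv.map (fun o => o.getD 0)

-- ===== PRECONDITION & SPEC =====
-- Pre_ excludes lists with duplicate values: there Python A leaves None (not an int) in the
-- output cells of the non-first duplicates, so its value is not a list of ints.
def Pre_increasing_numbers_order (lst : List Int) : Prop := lst.Nodup

instance (lst : List Int) : Decidable (Pre_increasing_numbers_order lst) := by
  unfold Pre_increasing_numbers_order; infer_instance

def pvWitness_increasing_numbers_order : List Int := [3, 1, 2]

def Spec_increasing_numbers_order (lst : List Int) (out : List Int) : Prop :=
  out = increasing_numbers_order_alt lst
instance (lst : List Int) (out : List Int) : Decidable (Spec_increasing_numbers_order lst out) := by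
  unfold Spec_increasing_numbers_order; infer_instance

-- ===== CLAIM (what is proved, stated in full; the proofs are below) =====
def Claim_equal_increasing_numbers_order : Prop :=
  ∀ (lst : List Int), Dom_increasing_numbers_order lst →
    Pre_increasing_numbers_order lst →
    Spec_increasing_numbers_order lst (increasing_numbers_order lst)

-- ===== LEMMAS AND PROOFS =====

-- the sorted index list B builds
def pvOrd (lst : List Int) : List Nat :=
  PySem.List.sorted (List.range lst.length) (fun i => lst.getD i 0)

theorem pvOrd_perm (lst : List Int) : (pvOrd lst).Perm (List.range lst.length) :=
  PySem.List.sorted_perm _ _ _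

theorem pvOrd_nodup (lst : List Int) : (pvOrd lst).Nodup :=
  (pvOrd_perm lst).nodup_iff.mpr (List.nodup_range)

-- in a duplicate-free list, the first index of lst[i] is i
theorem pvIndex (lst : List Int) (h : lst.Nodup) (i : Nat) (hi : i < lst.length) :
    PySem.List.index? lst lst[i] = some i := by
  rw [PySem.List.index?_eq_some_iff]
  refine ⟨lst.take i, lst.drop (i+1), ?_, by simp [hi.le], ?_⟩
  · conv_lhs => rw [← List.take_append_drop i lst, List.drop_eq_getElem_cons hi]
  · intro hmem
    obtain ⟨j, hj, he⟩ := List.getElem_of_mem hmem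
    have hj' : j < i := by simp at hj; omega
    rw [List.getElem_take] at he
    exact absurd (h.getElem_inj_iff.mp he) (by omega)

-- on a duplicate-free list the sorted index list is strictly increasing in value
theorem pvOrd_pairwise (lst : List Int) (h : lst.Nodup) :
    (pvOrd lst).Pairwise (fun i j => lst.getD i 0 < lst.getD j 0) := by
  have h1 : (pvOrd lst).Pairwise (fun i j => lst.getD i 0 ≤ lst.getD j 0) :=
    PySem.List.sorted_pairwise _ _
  have h2 := (pvOrd_nodup lst)
  refine ((h1.and h2).imp_of_mem ?_)
  intro a b ha hb hab
  have halt : a < lst.length := by have := (pvOrd_perm lst).mem_iff.mp ha; simpa using this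
  have hblt : b < lst.length := by have := (pvOrd_perm lst).mem_iff.mp hb; simpa using this
  rcases hab with ⟨hle, hne⟩
  refine lt_of_le_of_ne hle ?_
  rw [List.getD_eq_getElem lst 0 halt, List.getD_eq_getElem lst 0 hblt]
  intro he; exact hne (h.getElem_inj_iff.mp he)

-- core loop lemma: while the remaining values are exactly those of the suffix L of the sorted
-- index list, A's selection loop performs exactly B's assignments along L
theorem pvLoop (lst : List Int) (h : lst.Nodup) :
    ∀ (L : List Nat) (temp : List Int) (conv : List (Option Int)) (k : Int),
      (∀ i ∈ L, i < lst.length) →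
      L.Pairwise (fun i j => lst.getD i 0 < lst.getD j 0) →
      temp.Perm (L.map (fun i => lst.getD i 0)) →
      ((PySem.List.pyRange k (k + L.length) 1).foldl (pvStepA lst) (temp, conv)).2
        = (PySem.List.enumerate L k).foldl pvStepB conv := by
  intro L
  induction L with
  | nil =>
    intro temp conv k _ _ _
    simp [PySem.List.pyRange_one_eq_nil, PySem.List.enumerate]
  | cons i0 L' ih =>
    intro temp conv k hlt hpw hperm
    have hi0 : i0 < lst.length := hlt i0 List.mem_cons_self
    have hlen : k + ((i0 :: L').length : Nat) = (k + 1) + (L'.length : Nat) := by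
      simp only [List.length_cons]; push_cast; omega
    have hrange : PySem.List.pyRange k (k + ((i0 :: L').length : Nat)) 1
        = k :: PySem.List.pyRange (k+1) (k + ((i0 :: L').length : Nat)) 1 := by
      exact PySem.List.pyRange_one_cons (by simp only [List.length_cons]; push_cast; omega)
    -- the minimum of temp is lst[i0]
    have hv0mem : lst.getD i0 0 ∈ temp := by
      refine hperm.mem_iff.mpr ?_
      simp
    obtain ⟨m, hm⟩ : ∃ m, PySem.List.min? temp (fun x => x) = some m := by
      cases hmin : PySem.List.min? temp (fun x => x) with
      | none =>
        exfalso
        have : temp = [] := (PySem.List.min?_eq_none_iff _ _).mp hmin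
        rw [this] at hv0mem; simp at hv0mem
      | some m => exact ⟨m, rfl⟩
    have hmmem : m ∈ temp := PySem.List.min?_mem hm
    have hmin : ∀ y ∈ temp, m ≤ y := PySem.List.min?_isMin hm
    have hmv0 : m = lst.getD i0 0 := by
      have := hperm.mem_iff.mp hmmem
      simp only [List.map_cons, List.mem_cons, List.mem_map] at this
      rcases this with h1 | ⟨i, hiL', hkey⟩
      · exact h1
      · exfalso
        have hlt2 : lst.getD i0 0 < lst.getD i 0 := (List.rel_of_pairwise_cons hpw) hiL'
        have := hmin _ hv0mem
        omega
    have hidx : PySem.List.index? lst m = some i0 := by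
      rw [hmv0, List.getD_eq_getElem lst 0 hi0]
      exact pvIndex lst h i0 hi0
    have hrem : PySem.List.remove? temp m = some (temp.erase m) :=
      PySem.List.remove?_eq_some_erase temp m hmmem
    have hstep : pvStepA lst (temp, conv) k = (temp.erase m, conv.set i0 (some k)) := by
      rw [PySem.List.index?_eq_idxOf?] at hidx
      simp [pvStepA, hm, hidx, hrem]
    have hperm' : (temp.erase m).Perm (L'.map (fun i => lst.getD i 0)) := by
      have := hperm.erase m
      rw [hmv0] at this ⊢
      simpa using this
    rw [hrange]
    simp only [List.foldl_cons, hstep]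
    rw [hlen]
    rw [ih (temp.erase m) (conv.set i0 (some k)) (k+1)
      (fun i hi => hlt i (List.mem_cons_of_mem _ hi)) hpw.of_cons hperm']
    simp [PySem.List.enumerate, pvStepB]

theorem pvRangeMapGetD (l : List Int) : (List.range l.length).map (fun i => l.getD i 0) = l := by
  refine List.ext_getElem (by simp) ?_
  intro i h1 h2
  simp [List.getElem?_eq_getElem h2]

-- ===== VERDICT (by name: the statement is the Claim_ definition above) =====
theorem increasing_numbers_order_spec : Claim_equal_increasing_numbers_order := by
  intro lst _ hpre
  unfold Spec_increasing_numbers_order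
  unfold increasing_numbers_order increasing_numbers_order_alt
  simp only []
  congr 1
  have hlen : (pvOrd lst).length = lst.length := by
    simp [pvOrd, PySem.List.length_sorted]
  have hconv0 : (PySem.List.pyRange 0 lst.length 1).map (fun _ => (none : Option Int))
      = List.replicate lst.length none := by
    refine List.ext_getElem (by simp [PySem.List.length_pyRange_one]) ?_
    intro i h1 h2
    simp
  have hperm : lst.Perm ((pvOrd lst).map (fun i => lst.getD i 0)) := by
    have h1 := (pvOrd_perm lst).map (fun i => lst.getD i 0)
    rw [pvRangeMapGetD] at h1
    exact h1.symm
  have hrange : PySem.List.pyRange 0 (lst.length) 1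
      = PySem.List.pyRange 0 ((0:Int) + ((pvOrd lst).length : Nat)) 1 := by
    rw [hlen]; norm_num
  rw [hconv0, hrange]
  exact pvLoop lst hpre (pvOrd lst) lst (List.replicate lst.length none) 0
    (fun i hi => by have := (pvOrd_perm lst).mem_iff.mp hi; simpa using this)
    (pvOrd_pairwise lst hpre)
    hperm
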